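-- pv_equiv track=rewrite | github.com/aleqdev/itmo | inf/code_lab1.py | fib2dec
-- ===== SOURCE A (Python) =====
-- def fib2dec(fib_str):
--     fib_str = str(fib_str).strip()
--
--     fib = [1, 2]
--     while len(fib) < len(fib_str):
--         fib.append(fib[-1] + fib[-2])
--
--     result = 0
--     for i in range(len(fib_str)):
--         if fib_str[i] == '1':
--             result += fib[len(fib_str) - 1 - i]
--
--     return result
-- ===== SOURCE B (Python) =====
-- def fib2dec(fib_str):
--     s = str(fib_str).strip()
--     result = 0
--     a, b = 1, 2
--     for ch in reversed(s):
--         if ch == '1':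
--             result += a
--         a, b = b, a + b
--     return result
-- ===== Notes on version B (the rewrite author's own statement) =====
-- stated objective: simpler
-- what changed: Replaces the two-pass build-a-Fibonacci-list-then-index algorithm by a single right-to-left pass that maintains two scalar Fibonacci accumulators, so no list is built or indexed.
import Mathlib
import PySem

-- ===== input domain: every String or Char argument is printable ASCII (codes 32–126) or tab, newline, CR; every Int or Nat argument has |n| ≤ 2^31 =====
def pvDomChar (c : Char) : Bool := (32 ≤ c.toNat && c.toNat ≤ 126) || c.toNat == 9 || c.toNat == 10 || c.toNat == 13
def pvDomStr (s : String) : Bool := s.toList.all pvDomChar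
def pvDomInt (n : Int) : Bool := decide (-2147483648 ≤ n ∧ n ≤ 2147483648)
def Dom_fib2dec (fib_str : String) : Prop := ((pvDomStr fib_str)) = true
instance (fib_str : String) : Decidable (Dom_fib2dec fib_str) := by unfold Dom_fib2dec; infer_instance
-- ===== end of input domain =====

-- B replaces A's build-a-Fibonacci-list-then-index two-pass algorithm by a single
-- right-to-left pass with two scalar Fibonacci accumulators (objective: simpler).

-- ===== PORT A =====
-- while len(fib) < len(fib_str): fib.append(fib[-1] + fib[-2])
def pvBuildFib (fib : List Int) (n : Nat) : List Int :=
  if fib.length < n then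
    pvBuildFib (fib ++ [PySem.List.pyGetD fib (-1) 0 + PySem.List.pyGetD fib (-2) 0]) n
  else fib
termination_by n - fib.length
decreasing_by simp; omega

def fib2dec (fib_str : String) : Int :=
  let cs := (PySem.Str.strip fib_str).toList
  let fib := pvBuildFib [1, 2] cs.length
  (PySem.List.pyRange 0 cs.length 1).foldl
    (fun result i =>
      if PySem.List.pyGetD cs i ' ' = '1' then
        result + PySem.List.pyGetD fib ((cs.length : Int) - 1 - i) 0
      else result) 0

-- ===== PORT B =====
def fib2dec_alt (fib_str : String) : Int :=
  let cs := (PySem.Str.strip fib_str).toList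
  (cs.reverse.foldl
    (fun (st : Int × Int × Int) ch =>
      ((if ch = '1' then st.1 + st.2.1 else st.1), st.2.2, st.2.1 + st.2.2))
    (0, 1, 2)).1

-- ===== PRECONDITION & SPEC =====
def Spec_fib2dec (fib_str : String) (out : Int) : Prop := out = fib2dec_alt fib_str
instance (fib_str : String) (out : Int) : Decidable (Spec_fib2dec fib_str out) := by unfold Spec_fib2dec; infer_instance

-- ===== CLAIM (what is proved, stated in full; the proofs are below) =====
def Claim_equal_fib2dec : Prop := ∀ (fib_str : String), Dom_fib2dec fib_str → Spec_fib2dec fib_str (fib2dec fib_str)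

-- ===== LEMMAS AND PROOFS =====

-- the Fibonacci sequence A's list holds: 1, 2, 3, 5, …
def gfib : Nat → Int
  | 0 => 1
  | 1 => 2
  | n + 2 => gfib (n + 1) + gfib n

-- common value: sum of gfib (distance from the right end) over the '1' positions
def pvSsum : List Char → Int
  | [] => 0
  | c :: t => pvSsum t + (if c = '1' then gfib t.length else 0)

theorem gfib_rec (m : Nat) (h2 : 2 ≤ m) : gfib (m - 1) + gfib (m - 2) = gfib m := by
  obtain ⟨j, rfl⟩ : ∃ j, m = j + 2 := ⟨m - 2, by omega⟩
  rw [show j + 2 - 1 = j + 1 from by omega, show j + 2 - 2 = j from by omega, gfib]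

theorem pvBuildFib_aux (n k : Nat) : ∀ m, n - m = k → 2 ≤ m →
    pvBuildFib ((List.range m).map gfib) n = (List.range (max m n)).map gfib := by
  induction k with
  | zero =>
    intro m hk h2
    rw [pvBuildFib, if_neg (by simp only [List.length_map, List.length_range]; omega),
      Nat.max_eq_left (show n ≤ m by omega)]
  | succ k ih =>
    intro m hk h2
    have hmn : m < n := by omega
    rw [pvBuildFib, if_pos (by simp; omega)]
    have e1 : PySem.List.pyGetD ((List.range m).map gfib) (-1) 0 = gfib (m - 1) := by
      rw [PySem.List.pyGetD_neg_ofNat _ 1 _ (by omega) (by simp; omega)]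
      simp
    have e2 : PySem.List.pyGetD ((List.range m).map gfib) (-2) 0 = gfib (m - 2) := by
      rw [PySem.List.pyGetD_neg_ofNat _ 2 _ (by omega) (by simp; omega)]
      simp
    rw [e1, e2, gfib_rec m h2,
      show (List.range m).map gfib ++ [gfib m] = (List.range (m + 1)).map gfib by
        rw [List.range_succ]; simp,
      ih (m + 1) (by omega) (by omega),
      show max (m + 1) n = max m n from by omega]

theorem pvBuildFib_eq (n m : Nat) (h2 : 2 ≤ m) :
    pvBuildFib ((List.range m).map gfib) n = (List.range (max m n)).map gfib :=
  pvBuildFib_aux n (n - m) m rfl h2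

theorem pvSum (M : Nat) : ∀ (cs : List Char), cs.length ≤ M →
    ((PySem.List.pyRange 0 (cs.length : Int) 1).map
      (fun i => if PySem.List.pyGetD cs i ' ' = '1' then
          PySem.List.pyGetD ((List.range M).map gfib) ((cs.length : Int) - 1 - i) 0 else 0)).sum
    = pvSsum cs := by
  intro cs
  induction cs with
  | nil => intro _; simp [PySem.List.pyRange_one_eq_nil, pvSsum]
  | cons c t ih =>
    intro hM
    rw [PySem.List.pyRange_one_cons (by simp only [List.length_cons]; omega)]
    simp only [List.map_cons, List.sum_cons]
    have hhd : (if PySem.List.pyGetD (c :: t) 0 ' ' = '1' then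
        PySem.List.pyGetD ((List.range M).map gfib) (((c :: t).length : Int) - 1 - 0) 0 else 0)
        = (if c = '1' then gfib t.length else 0) := by
      rw [PySem.List.pyGetD_zero_cons,
        show (((c :: t).length : Int) - 1 - 0) = (t.length : Int) from by simp,
        PySem.List.pyGetD_natCast]
      simp only [List.getD_eq_getElem?_getD, List.getElem?_map,
        List.getElem?_range (show t.length < M from by simp at hM; omega)]
      rfl
    have htail : (PySem.List.pyRange 1 ((c :: t).length : Int) 1).map
        (fun i => if PySem.List.pyGetD (c :: t) i ' ' = '1' then
          PySem.List.pyGetD ((List.range M).map gfib) (((c :: t).length : Int) - 1 - i) 0 else 0)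
        = (PySem.List.pyRange 0 (t.length : Int) 1).map
        (fun i => if PySem.List.pyGetD t i ' ' = '1' then
          PySem.List.pyGetD ((List.range M).map gfib) ((t.length : Int) - 1 - i) 0 else 0) := by
      rw [PySem.List.pyRange_one, PySem.List.pyRange_one,
        show ((((c :: t).length : Int) - 1).toNat) = t.length from by simp,
        show (((t.length : Int) - 0).toNat) = t.length from by simp]
      simp only [List.map_map]
      apply List.map_congr_left
      intro k _
      simp only [Function.comp_apply]
      have hi : (1 : Int) + k = ((k + 1 : Nat) : Int) := by push_cast; ring
      have hz : (0 : Int) + k = ((k : Nat) : Int) := by ring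
      rw [hi, hz, PySem.List.pyGetD_natCast, PySem.List.pyGetD_natCast,
        List.getD_cons_succ,
        show (((c :: t).length : Int) - 1 - ((k + 1 : Nat) : Int)) = ((t.length : Int) - 1 - ((k : Nat) : Int)) from by
          simp only [List.length_cons]; push_cast; ring]
    rw [zero_add, hhd, htail, ih (by simp at hM ⊢; omega), pvSsum]
    ring

theorem pvFoldIf {α : Type} (l : List α) (p : α → Prop) [DecidablePred p] (f : α → Int) :
    ∀ (a : Int), l.foldl (fun r i => if p i then r + f i else r) a
      = a + (l.map (fun i => if p i then f i else 0)).sum := by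
  induction l with
  | nil => intro a; simp
  | cons x xs ih =>
    intro a
    simp only [List.foldl_cons, List.map_cons, List.sum_cons, ih]
    split_ifs <;> ring

theorem pvBfold (cs : List Char) :
    cs.reverse.foldl
      (fun (st : Int × Int × Int) ch =>
        ((if ch = '1' then st.1 + st.2.1 else st.1), st.2.2, st.2.1 + st.2.2))
      (0, 1, 2)
    = (pvSsum cs, gfib cs.length, gfib (cs.length + 1)) := by
  induction cs with
  | nil => rfl
  | cons c t ih =>
    simp only [List.reverse_cons, List.foldl_append, ih, List.foldl_cons, List.foldl_nil,
      pvSsum, List.length_cons]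
    rw [show t.length + 1 + 1 = t.length + 2 from rfl, gfib]
    split_ifs <;> refine Prod.ext (by ring) (Prod.ext rfl (by ring))

theorem fib2dec_alt_eq (fib_str : String) :
    fib2dec_alt fib_str = pvSsum (PySem.Str.strip fib_str).toList := by
  show (((PySem.Str.strip fib_str).toList).reverse.foldl _ (0, 1, 2)).1 = _
  rw [pvBfold]

theorem fib2dec_eq (fib_str : String) :
    fib2dec fib_str = pvSsum (PySem.Str.strip fib_str).toList := by
  simp only [fib2dec]
  rw [show ([1, 2] : List Int) = (List.range 2).map gfib from rfl,
    pvBuildFib_eq _ 2 (by omega), pvFoldIf, zero_add]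
  exact pvSum _ _ (Nat.le_max_right _ _)

-- ===== VERDICT (by name: the statement is the Claim_ definition above) =====
theorem fib2dec_spec : Claim_equal_fib2dec := by
  intro s _
  unfold Spec_fib2dec
  rw [fib2dec_eq, fib2dec_alt_eq]
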